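-- pv_equiv track=rewrite | github.com/jinyoong/SWEA | problem/D2/1285. 아름이의 돌 던지기.py | throw_stone
-- ===== SOURCE A (Python) =====
-- def throw_stone(list_in):
--     distance_list = []
--     min_distance = 100000
--     for element in list_in:
--         temp = abs(element - 0)
--         if temp < min_distance:
--             min_distance = temp
--         distance_list.append(temp)
--     return min_distance, distance_list.count(min_distance)
-- ===== SOURCE B (Python) =====
-- def throw_stone(list_in):
--     min_distance = 100000
--     count = 0
--     for element in list_in:
--         temp = abs(element)
--         if temp < min_distance:
--             min_distance = temp
--             count = 1
--         elif temp == min_distance: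
--             count += 1
--     return min_distance, count
-- ===== Notes on version B (the rewrite author's own statement) =====
-- stated objective: simpler
-- what changed: Single pass keeping (current min, its count) instead of building a distance list, taking its min, and then rescanning it with list.count; one pass and O(1) extra space removes the second scan and the list allocation.
import Mathlib
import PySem

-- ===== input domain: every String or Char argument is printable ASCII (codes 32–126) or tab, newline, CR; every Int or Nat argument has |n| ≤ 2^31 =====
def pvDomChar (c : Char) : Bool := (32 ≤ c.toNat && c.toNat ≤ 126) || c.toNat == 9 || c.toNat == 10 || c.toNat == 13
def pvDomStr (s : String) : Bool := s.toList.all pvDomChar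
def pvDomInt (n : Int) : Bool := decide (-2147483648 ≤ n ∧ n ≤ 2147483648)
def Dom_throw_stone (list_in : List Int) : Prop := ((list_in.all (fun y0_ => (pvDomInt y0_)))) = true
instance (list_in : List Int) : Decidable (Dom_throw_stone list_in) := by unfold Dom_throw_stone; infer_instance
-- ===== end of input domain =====

-- B replaces A's build-list / take-min / rescan-with-count by a single pass carrying (min, count); simpler, O(1) extra space.

-- ===== PORT A =====
-- A: build distance_list while tracking min, then count min in distance_list.
def throw_stone (list_in : List Int) : Int × Int :=
  let st := list_in.foldl
    (fun (p : List Int × Int) element =>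
      let temp := |element - 0|
      let m := if temp < p.2 then temp else p.2
      (p.1 ++ [temp], m))
    ([], 100000)
  (st.2, PySem.List.count st.1 st.2)

-- ===== PORT B =====
-- B: one pass carrying (current min, its count).
def throw_stone_alt (list_in : List Int) : Int × Int :=
  list_in.foldl
    (fun (p : Int × Int) element =>
      let temp := |element|
      if temp < p.1 then (temp, 1)
      else if temp = p.1 then (p.1, p.2 + 1)
      else p)
    (100000, 0)

-- ===== PRECONDITION & SPEC =====
def Spec_throw_stone (list_in : List Int) (out : Int × Int) : Prop := out = throw_stone_alt list_in
instance (list_in : List Int) (out : Int × Int) : Decidable (Spec_throw_stone list_in out) := by unfold Spec_throw_stone; infer_instance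

-- ===== CLAIM (what is proved, stated in full; the proofs are below) =====
def Claim_equal_throw_stone : Prop := ∀ (list_in : List Int), Dom_throw_stone list_in → Spec_throw_stone list_in (throw_stone list_in)

-- ===== LEMMAS AND PROOFS =====

-- Invariant: if m is a lower bound of dl, then B's fold started at (m, count of m in dl)
-- computes A's final min together with the count of that min in A's final list.
theorem throw_stone_loop_eq (l dl : List Int) (m : Int)
    (hlb : ∀ x ∈ dl, m ≤ x) :
    l.foldl
      (fun (p : Int × Int) element =>
        let temp := |element|
        if temp < p.1 then (temp, 1)
        else if temp = p.1 then (p.1, p.2 + 1)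
        else p)
      (m, (PySem.List.count dl m : Int))
    =
    ((l.foldl
        (fun (p : List Int × Int) element =>
          let temp := |element - 0|
          let m' := if temp < p.2 then temp else p.2
          (p.1 ++ [temp], m'))
        (dl, m)).2,
      ((PySem.List.count
        (l.foldl
          (fun (p : List Int × Int) element =>
            let temp := |element - 0|
            let m' := if temp < p.2 then temp else p.2
            (p.1 ++ [temp], m'))
          (dl, m)).1
        (l.foldl
          (fun (p : List Int × Int) element =>
            let temp := |element - 0|
            let m' := if temp < p.2 then temp else p.2
            (p.1 ++ [temp], m'))
          (dl, m)).2 : Int))) := by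
  induction l generalizing dl m with
  | nil => simp
  | cons e l ih =>
    simp only [List.foldl_cons]
    have habs : |e - 0| = |e| := by ring_nf
    by_cases h1 : |e| < m
    · have hcount : PySem.List.count (dl ++ [|e|]) |e| = 1 := by
        have hzero : dl.count |e| = 0 := by
          rw [List.count_eq_zero]
          intro hm
          exact absurd (hlb _ hm) (not_le.mpr h1)
        simp [PySem.List.count_eq, hzero]
      have := ih (dl ++ [|e|]) |e| (by
        intro x hx
        rcases List.mem_append.mp hx with hx | hx
        · exact le_of_lt (lt_of_lt_of_le h1 (hlb _ hx))
        · simp at hx; omega)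
      simp only [habs, if_pos h1, hcount] at *
      exact this
    · have hlb' : ∀ x ∈ dl ++ [|e|], m ≤ x := by
        intro x hx
        rcases List.mem_append.mp hx with hx | hx
        · exact hlb _ hx
        · simp at hx; omega
      by_cases h2 : |e| = m
      · have hcount : PySem.List.count (dl ++ [|e|]) m = PySem.List.count dl m + 1 := by
          simp [PySem.List.count_eq, h2]
        have := ih (dl ++ [|e|]) m hlb'
        simp only [habs, if_neg h1, if_pos h2, hcount] at *
        exact this
      · have hcount : PySem.List.count (dl ++ [|e|]) m = PySem.List.count dl m := by
          simp [PySem.List.count_eq, List.count_append, h2]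
        have := ih (dl ++ [|e|]) m hlb'
        simp only [habs, if_neg h1, if_neg h2, hcount] at *
        -- A's min update: ¬(|e| < m) means min stays m
        simpa [if_neg h1] using this

-- ===== VERDICT (by name: the statement is the Claim_ definition above) =====
theorem throw_stone_spec : Claim_equal_throw_stone := by
  intro l _
  unfold Spec_throw_stone throw_stone throw_stone_alt
  have h := throw_stone_loop_eq l [] 100000 (by intro x hx; simp at hx)
  simp [PySem.List.count] at h ⊢
  exact h.symm
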